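-- pv_equiv track=rewrite | github.com/KevinMathisen/advent-of-code-2023 | 5/5_2.py | convertToNewDesiredFromStep
-- ===== SOURCE A (Python) =====
-- def convertToNewDesiredFromStep(oldDesired, rules):
-- 	foundDesiredOutValues = []
-- 	newDesiredOutValues = []
-- 	# go trough each rule, to find if any of their output overlaps with the desired output
-- 	# IF so, save the valid range to mapOutValues
-- 	# for any part of the desired output, if no overlap with rules, these parts desired output will be the same
-- 	for rule in rules:
-- 		# Go trough all desired ranges
-- 		for outValue in oldDesired:
-- 			# Calculate the overlap if there is any
-- 			startOverlap = max(outValue[0], rule[0])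
-- 			endOverlap = min(outValue[1], rule[0]+rule[2]-1)
-- 			if startOverlap <= endOverlap:
-- 				# Calculate the new desired values for the next stage
-- 				# Also, save the overlap we found from the current
-- 				startOut = startOverlap - rule[0] + rule[1]
-- 				endOut = endOverlap - rule[0] + rule[1]
-- 				newDesiredOutValues.append([startOut, endOut])
-- 				foundDesiredOutValues.append([startOverlap, endOverlap])
--
-- 	# Remove where we have found valid ranges from the desired range, but keep where we did not found anything
-- 	# Then merge these ranges to find the true desiredValues
-- 	oldDesiredWithoutOverlap = removeOverlap(oldDesired, foundDesiredOutValues)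
-- 	newDesiredOutValues = newDesiredOutValues + oldDesiredWithoutOverlap
--
-- 	return sorted(newDesiredOutValues, key=lambda range: range[0])
--
-- def removeOverlap(original, toRemove):
-- 	newRange = original[:]
-- 	for rangeRemove in toRemove:
-- 		newTempRange = []
-- 		for orgRange in newRange:
--
-- 			startOverlap = max(orgRange[0], rangeRemove[0])
-- 			endOverlap = min(orgRange[1], rangeRemove[1])
--
-- 			# No overlap
-- 			if startOverlap > endOverlap:
-- 				newTempRange.append(orgRange)
-- 				continue
--
-- 			# If total overlap
-- 			if startOverlap <= orgRange[0] and endOverlap >= orgRange[1]: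
-- 				continue
-- 			# partial overlaps
-- 			elif startOverlap > orgRange[0] and endOverlap >= orgRange[1]:
-- 				newTempRange.append([orgRange[0], startOverlap-1])
-- 			elif startOverlap <= orgRange[0] and endOverlap < orgRange[1]:
-- 				newTempRange.append([endOverlap+1, orgRange[1]])
-- 			elif startOverlap > orgRange[0] and endOverlap < orgRange[1]:
-- 				newTempRange.append([orgRange[0], startOverlap-1])
-- 				newTempRange.append([endOverlap+1, orgRange[1]])
--
-- 		newRange = newTempRange[:]
--
-- 	return newRange
-- ===== SOURCE B (Python) =====
-- def convertToNewDesiredFromStep(oldDesired, rules):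
-- 	# Mapped parts: each desired range intersected with each rule's source range,
-- 	# shifted to destination coordinates (rule-major order, as the rules apply).
-- 	mapped = [[max(o[0], r[0]) - r[0] + r[1], min(o[1], r[0] + r[2] - 1) - r[0] + r[1]]
-- 			  for r in rules for o in oldDesired
-- 			  if max(o[0], r[0]) <= min(o[1], r[0] + r[2] - 1)]
-- 	# Unmapped remnants: process each desired range independently with a worklist,
-- 	# cutting every rule's source interval out of the still-unmapped pieces.
-- 	remnants = []
-- 	for o in oldDesired:
-- 		pieces = [o]
-- 		for r in rules:
-- 			lo, hi = r[0], r[0] + r[2] - 1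
-- 			nxt = []
-- 			for p in pieces:
-- 				s, e = max(p[0], lo), min(p[1], hi)
-- 				if s > e:
-- 					nxt.append(p)
-- 				else:
-- 					if p[0] < s:
-- 						nxt.append([p[0], s - 1])
-- 					if e < p[1]:
-- 						nxt.append([e + 1, p[1]])
-- 			pieces = nxt
-- 		remnants += pieces
-- 	return sorted(mapped + remnants, key=lambda rng: rng[0])
-- ===== Notes on version B (the rewrite author's own statement) =====
-- stated objective: alternative
-- what changed: A collects every mapped overlap globally and then subtracts the whole found-overlap list from every desired range via repeated list rebuilding (removeOverlap); B processes each desired range independently with a worklist, cutting each rule's source interval out of the still-unmapped pieces in one pass, and builds the mapped ranges directly by intersection (not measurably faster on the timed inputs).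
import Mathlib
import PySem

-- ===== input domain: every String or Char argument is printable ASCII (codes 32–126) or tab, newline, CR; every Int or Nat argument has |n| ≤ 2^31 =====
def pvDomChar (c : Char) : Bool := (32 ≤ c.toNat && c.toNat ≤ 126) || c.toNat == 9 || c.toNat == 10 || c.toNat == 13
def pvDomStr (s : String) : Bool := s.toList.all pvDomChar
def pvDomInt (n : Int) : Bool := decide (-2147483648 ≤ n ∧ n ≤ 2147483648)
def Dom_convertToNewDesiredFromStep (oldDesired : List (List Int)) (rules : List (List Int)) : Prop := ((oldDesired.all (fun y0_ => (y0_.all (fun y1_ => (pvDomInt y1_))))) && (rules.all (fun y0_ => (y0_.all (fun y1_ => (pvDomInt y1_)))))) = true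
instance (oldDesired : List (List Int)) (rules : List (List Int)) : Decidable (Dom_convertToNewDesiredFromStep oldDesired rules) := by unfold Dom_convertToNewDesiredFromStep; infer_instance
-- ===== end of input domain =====

-- B replaces A's two-phase scheme (collect every mapped overlap globally, then subtract the whole
-- overlap list from every desired range) by one independent worklist pass per desired range that
-- cuts each rule's source interval out of the still-unmapped pieces; alternative decomposition,
-- same return value.

-- shared trivial getter: Python's xs[i] (in range on every index Pre_ admits; default unused there)
def pvG (p : List Int) (i : Int) : Int := PySem.List.pyGetD p i 0

-- ===== PORT A =====
def removeOverlap (original : List (List Int)) (toRemove : List (List Int)) : List (List Int) :=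
  toRemove.foldl (fun newRange rangeRemove =>
    newRange.foldl (fun newTempRange orgRange =>
      let startOverlap := max (pvG orgRange 0) (pvG rangeRemove 0)
      let endOverlap := min (pvG orgRange 1) (pvG rangeRemove 1)
      if startOverlap > endOverlap then newTempRange ++ [orgRange]
      else if startOverlap ≤ pvG orgRange 0 ∧ endOverlap ≥ pvG orgRange 1 then newTempRange
      else if startOverlap > pvG orgRange 0 ∧ endOverlap ≥ pvG orgRange 1 then
        newTempRange ++ [[pvG orgRange 0, startOverlap - 1]]
      else if startOverlap ≤ pvG orgRange 0 ∧ endOverlap < pvG orgRange 1 then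
        newTempRange ++ [[endOverlap + 1, pvG orgRange 1]]
      else if startOverlap > pvG orgRange 0 ∧ endOverlap < pvG orgRange 1 then
        newTempRange ++ [[pvG orgRange 0, startOverlap - 1], [endOverlap + 1, pvG orgRange 1]]
      else newTempRange) []) original

def convertToNewDesiredFromStep (oldDesired : List (List Int)) (rules : List (List Int)) : List (List Int) :=
  let st := rules.foldl (fun (st : List (List Int) × List (List Int)) rule =>
      oldDesired.foldl (fun (st : List (List Int) × List (List Int)) outValue =>
        let startOverlap := max (pvG outValue 0) (pvG rule 0)
        let endOverlap := min (pvG outValue 1) (pvG rule 0 + pvG rule 2 - 1)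
        if startOverlap ≤ endOverlap then
          (st.1 ++ [[startOverlap, endOverlap]],
           st.2 ++ [[startOverlap - pvG rule 0 + pvG rule 1, endOverlap - pvG rule 0 + pvG rule 1]])
        else st) st) (([], []) : List (List Int) × List (List Int))
  PySem.List.sorted (st.2 ++ removeOverlap oldDesired st.1) (fun rng => pvG rng 0) false

-- ===== PORT B =====
def convertToNewDesiredFromStep_alt (oldDesired : List (List Int)) (rules : List (List Int)) : List (List Int) :=
  let mapped := rules.flatMap (fun r =>
    oldDesired.filterMap (fun o =>
      if max (pvG o 0) (pvG r 0) ≤ min (pvG o 1) (pvG r 0 + pvG r 2 - 1) then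
        some [max (pvG o 0) (pvG r 0) - pvG r 0 + pvG r 1,
              min (pvG o 1) (pvG r 0 + pvG r 2 - 1) - pvG r 0 + pvG r 1]
      else none))
  let remnants := oldDesired.flatMap (fun o =>
    rules.foldl (fun pieces r =>
      pieces.flatMap (fun p =>
        let s := max (pvG p 0) (pvG r 0)
        let e := min (pvG p 1) (pvG r 0 + pvG r 2 - 1)
        if s > e then [p]
        else (if pvG p 0 < s then [[pvG p 0, s - 1]] else []) ++
             (if e < pvG p 1 then [[e + 1, pvG p 1]] else []))) [o])
  PySem.List.sorted (mapped ++ remnants) (fun rng => pvG rng 0) false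

-- ===== PRECONDITION & SPEC =====
-- Exactly the inputs on which the Python A returns (anywhere else it raises IndexError):
-- with no desired range nothing is ever indexed; with no rule only the sort key reads o[0];
-- otherwise every desired range is indexed at 0 and 1 and every rule at 0 and 2 (and, on
-- overlap, 1).
def Pre_convertToNewDesiredFromStep (oldDesired : List (List Int)) (rules : List (List Int)) : Prop :=
  oldDesired = [] ∨ (rules = [] ∧ ∀ o ∈ oldDesired, 1 ≤ o.length) ∨
    ((∀ o ∈ oldDesired, 2 ≤ o.length) ∧ ∀ r ∈ rules, 3 ≤ r.length)
instance (oldDesired : List (List Int)) (rules : List (List Int)) : Decidable (Pre_convertToNewDesiredFromStep oldDesired rules) := by unfold Pre_convertToNewDesiredFromStep; infer_instance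

def pvWitness_convertToNewDesiredFromStep : List (List Int) × List (List Int) :=
  ([[1, 5], [10, 12]], [[3, 20, 4]])

def Spec_convertToNewDesiredFromStep (oldDesired : List (List Int)) (rules : List (List Int)) (out : List (List Int)) : Prop := out = convertToNewDesiredFromStep_alt oldDesired rules
instance (oldDesired : List (List Int)) (rules : List (List Int)) (out : List (List Int)) : Decidable (Spec_convertToNewDesiredFromStep oldDesired rules out) := by unfold Spec_convertToNewDesiredFromStep; infer_instance

-- ===== CLAIM (what is proved, stated in full; the proofs are below) =====
def Claim_equal_convertToNewDesiredFromStep : Prop := ∀ (oldDesired : List (List Int)) (rules : List (List Int)), Dom_convertToNewDesiredFromStep oldDesired rules → Pre_convertToNewDesiredFromStep oldDesired rules → Spec_convertToNewDesiredFromStep oldDesired rules (convertToNewDesiredFromStep oldDesired rules)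

-- ===== LEMMAS AND PROOFS =====
-- (The two ports are in fact equal on ALL inputs, since both read out-of-range indices
-- through the same defaulted getter pvG; the proof below never uses Pre_ or Dom_.)

-- proof-layer view of one interval cut (definitionally B's per-piece body)
def pvCut (c d : Int) (p : List Int) : List (List Int) :=
  if max (pvG p 0) c > min (pvG p 1) d then [p]
  else (if pvG p 0 < max (pvG p 0) c then [[pvG p 0, max (pvG p 0) c - 1]] else []) ++
       (if min (pvG p 1) d < pvG p 1 then [[min (pvG p 1) d + 1, pvG p 1]] else [])

-- cutting a piece list by a whole list of (start, end) intervals, in order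
def pvCutList (P : List (List Int)) (F : List (Int × Int)) : List (List Int) :=
  F.foldl (fun P f => P.flatMap (pvCut f.1 f.2)) P

-- the overlaps one rule contributes to A's foundDesiredOutValues, in desired order
def pvFound (oldDesired : List (List Int)) (r : List Int) : List (List Int) :=
  oldDesired.filterMap (fun o =>
    if max (pvG o 0) (pvG r 0) ≤ min (pvG o 1) (pvG r 0 + pvG r 2 - 1) then
      some [max (pvG o 0) (pvG r 0), min (pvG o 1) (pvG r 0 + pvG r 2 - 1)]
    else none)

-- the destination-shifted ranges one rule contributes to A's newDesiredOutValues
def pvMapped (oldDesired : List (List Int)) (r : List Int) : List (List Int) :=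
  oldDesired.filterMap (fun o =>
    if max (pvG o 0) (pvG r 0) ≤ min (pvG o 1) (pvG r 0 + pvG r 2 - 1) then
      some [max (pvG o 0) (pvG r 0) - pvG r 0 + pvG r 1,
            min (pvG o 1) (pvG r 0 + pvG r 2 - 1) - pvG r 0 + pvG r 1]
    else none)

-- q's interval lies inside [o0, o1]
def pvSub (o0 o1 : Int) (q : List Int) : Prop :=
  ∀ x : Int, pvG q 0 ≤ x → x ≤ pvG q 1 → o0 ≤ x ∧ x ≤ o1

theorem pvG_pair0 (a b : Int) : pvG [a, b] 0 = a := rfl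
theorem pvG_pair1 (a b : Int) : pvG [a, b] 1 = b := rfl

theorem pvCutList_nil_P (F : List (Int × Int)) : pvCutList [] F = [] := by
  induction F with
  | nil => rfl
  | cons f F ih => simpa [pvCutList] using ih

theorem pvCutList_append_F (P : List (List Int)) (F G : List (Int × Int)) :
    pvCutList P (F ++ G) = pvCutList (pvCutList P F) G := by
  simp [pvCutList, List.foldl_append]

theorem pvCutList_append_P (P Q : List (List Int)) (F : List (Int × Int)) :
    pvCutList (P ++ Q) F = pvCutList P F ++ pvCutList Q F := by
  induction F generalizing P Q with
  | nil => rfl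
  | cons f F ih =>
      show pvCutList ((P ++ Q).flatMap (pvCut f.1 f.2)) F = _
      rw [List.flatMap_append]; exact ih _ _

theorem pvCutList_flatMap (P : List (List Int)) (F : List (Int × Int)) :
    pvCutList P F = P.flatMap (fun q => pvCutList [q] F) := by
  induction P with
  | nil => simp [pvCutList_nil_P]
  | cons q P ih =>
      rw [show q :: P = [q] ++ P from rfl, pvCutList_append_P, ih]; simp

-- a cut's pieces stay inside the piece and avoid the removed interval
theorem pvCut_sub (c d : Int) (p q : List Int) (hq : q ∈ pvCut c d p) :
    ∀ x : Int, pvG q 0 ≤ x → x ≤ pvG q 1 →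
      (pvG p 0 ≤ x ∧ x ≤ pvG p 1) ∧ ¬(c ≤ x ∧ x ≤ d) := by
  intro x h0 h1
  unfold pvCut at hq
  split_ifs at hq <;>
    simp only [List.mem_append, List.mem_cons, List.not_mem_nil, or_false,
      List.append_nil, List.nil_append] at hq <;>
    (rcases hq with rfl | rfl <;> (try simp only [pvG_pair0, pvG_pair1] at h0 h1) <;> omega)

theorem pvCut_noop (c d : Int) (p : List Int)
    (h : ∀ x : Int, pvG p 0 ≤ x → x ≤ pvG p 1 → ¬(c ≤ x ∧ x ≤ d)) : pvCut c d p = [p] := by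
  have hse : max (pvG p 0) c > min (pvG p 1) d := by
    by_contra hc
    have := h (max (pvG p 0) c) (by omega) (by omega)
    omega
  simp [pvCut, hse]

theorem pvCutList_noop (F : List (Int × Int)) (P : List (List Int))
    (h : ∀ f ∈ F, ∀ q ∈ P, ∀ x : Int, pvG q 0 ≤ x → x ≤ pvG q 1 → ¬(f.1 ≤ x ∧ x ≤ f.2)) :
    pvCutList P F = P := by
  induction F with
  | nil => rfl
  | cons f F ih =>
      show pvCutList (P.flatMap (pvCut f.1 f.2)) F = P
      have hP : P.flatMap (pvCut f.1 f.2) = P := by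
        have hone : ∀ q ∈ P, pvCut f.1 f.2 q = [q] := fun q hq =>
          pvCut_noop _ _ _ (h f (by simp) q hq)
        calc P.flatMap (pvCut f.1 f.2) = P.flatMap (fun q => [q]) :=
              List.flatMap_congr (fun q hq => hone q hq)
          _ = P := by simp
      rw [hP]
      exact ih (fun g hg q hq => h g (by simp [hg]) q hq)

-- cutting an interval that is (within p) contained in [γ, δ] is absorbed by the γ-δ cut
theorem pvCut_absorb (c d γ δ : Int) (p : List Int)
    (hsub : ∀ x : Int, pvG p 0 ≤ x → x ≤ pvG p 1 → c ≤ x → x ≤ d → γ ≤ x ∧ x ≤ δ) :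
    (pvCut c d p).flatMap (pvCut γ δ) = pvCut γ δ p := by
  by_cases hse : max (pvG p 0) c > min (pvG p 1) d
  · have h1 : pvCut c d p = [p] := by rw [pvCut]; simp [hse]
    rw [h1]; simp
  · have k1 : γ ≤ max (pvG p 0) c ∧ max (pvG p 0) c ≤ δ := by apply hsub <;> omega
    have k2 : γ ≤ min (pvG p 1) d ∧ min (pvG p 1) d ≤ δ := by apply hsub <;> omega
    have hexp : pvCut c d p =
        (if pvG p 0 < max (pvG p 0) c then [[pvG p 0, max (pvG p 0) c - 1]] else []) ++
        (if min (pvG p 1) d < pvG p 1 then [[min (pvG p 1) d + 1, pvG p 1]] else []) := by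
      rw [pvCut]; simp [hse]
    rw [hexp, List.flatMap_append]
    split_ifs <;>
      simp only [List.flatMap_cons, List.flatMap_nil, List.append_nil, List.nil_append] <;>
      simp only [pvCut, pvG_pair0, pvG_pair1] <;>
      (split_ifs <;>
        (try simp only [List.cons_append, List.nil_append, List.append_nil, List.cons.injEq,
          List.nil_eq, and_true, true_and]) <;>
        first
          | rfl
          | omega)

-- cutting by any interval list that contains (γ, δ) and whose members lie (within the
-- enclosing desired range [o0, o1]) inside [γ, δ] equals the single γ-δ cut
theorem pvMain (o0 o1 γ δ : Int) (F₁ : List (Int × Int)) :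
    ∀ (F₂ : List (Int × Int)) (q : List Int), pvSub o0 o1 q →
      (∀ f ∈ F₁ ++ F₂, ∀ x : Int, o0 ≤ x → x ≤ o1 → f.1 ≤ x → x ≤ f.2 → γ ≤ x ∧ x ≤ δ) →
      pvCutList [q] (F₁ ++ (γ, δ) :: F₂) = pvCut γ δ q := by
  induction F₁ with
  | nil =>
      intro F₂ q hsub hf
      show pvCutList (([q] : List (List Int)).flatMap (pvCut γ δ)) F₂ = pvCut γ δ q
      rw [show ([q] : List (List Int)).flatMap (pvCut γ δ) = pvCut γ δ q by simp]
      apply pvCutList_noop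
      intro f hfF₂ q' hq' x hx0 hx1 hcd
      have hsb := pvCut_sub γ δ q q' hq' x hx0 hx1
      have hxo := hsub x hsb.1.1 hsb.1.2
      exact hsb.2 (hf f (by simp [hfF₂]) x hxo.1 hxo.2 hcd.1 hcd.2)
  | cons f F₁ ih =>
      intro F₂ q hsub hf
      show pvCutList (([q] : List (List Int)).flatMap (pvCut f.1 f.2)) (F₁ ++ (γ, δ) :: F₂) = pvCut γ δ q
      rw [show ([q] : List (List Int)).flatMap (pvCut f.1 f.2) = pvCut f.1 f.2 q by simp]
      rw [pvCutList_flatMap]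
      have hpieces : ∀ q' ∈ pvCut f.1 f.2 q,
          pvCutList [q'] (F₁ ++ (γ, δ) :: F₂) = pvCut γ δ q' := by
        intro q' hq'
        apply ih
        · intro x hx0 hx1
          exact hsub x ((pvCut_sub _ _ _ _ hq' x hx0 hx1).1.1) ((pvCut_sub _ _ _ _ hq' x hx0 hx1).1.2)
        · intro g hg; exact hf g (by simp at hg ⊢; tauto)
      rw [List.flatMap_congr hpieces]
      apply pvCut_absorb
      intro x hx0 hx1 hc hd
      have hxo := hsub x hx0 hx1
      exact hf f (by simp) x hxo.1 hxo.2 hc hd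

theorem pvCut_eq_of (c d c' d' : Int) (q : List Int)
    (h1 : max (pvG q 0) c = max (pvG q 0) c') (h2 : min (pvG q 1) d = min (pvG q 1) d') :
    pvCut c d q = pvCut c' d' q := by
  unfold pvCut; rw [h1, h2]

theorem pvFr_bounds (oldDesired : List (List Int)) (r : List Int) (f : Int × Int)
    (hf : f ∈ (pvFound oldDesired r).map (fun e => (pvG e 0, pvG e 1))) :
    pvG r 0 ≤ f.1 ∧ f.2 ≤ pvG r 0 + pvG r 2 - 1 := by
  simp only [List.mem_map, pvFound, List.mem_filterMap] at hf
  obtain ⟨e, ⟨o', _, he⟩, rfl⟩ := hf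
  split_ifs at he with hc
  simp only [Option.some.injEq] at he; subst he
  simp only [pvG_pair0, pvG_pair1]; omega

-- one rule: cutting by all overlaps the rule found (across all desired ranges) acts on a
-- piece of o exactly like cutting by the rule's full source interval
theorem pvRuleStep (oldDesired : List (List Int)) (o : List Int) (ho : o ∈ oldDesired)
    (r : List Int) (q : List Int) (hsub : pvSub (pvG o 0) (pvG o 1) q) :
    pvCutList [q] ((pvFound oldDesired r).map (fun e => (pvG e 0, pvG e 1))) =
      pvCut (pvG r 0) (pvG r 0 + pvG r 2 - 1) q := by
  by_cases hov : max (pvG o 0) (pvG r 0) ≤ min (pvG o 1) (pvG r 0 + pvG r 2 - 1)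
  · have hmem : (max (pvG o 0) (pvG r 0), min (pvG o 1) (pvG r 0 + pvG r 2 - 1)) ∈
        (pvFound oldDesired r).map (fun e => (pvG e 0, pvG e 1)) := by
      simp only [List.mem_map, pvFound, List.mem_filterMap]
      exact ⟨[max (pvG o 0) (pvG r 0), min (pvG o 1) (pvG r 0 + pvG r 2 - 1)],
        ⟨o, ho, by rw [if_pos hov]⟩, by simp [pvG_pair0, pvG_pair1]⟩
    obtain ⟨F₁, F₂, hF⟩ := List.append_of_mem hmem
    rw [hF]
    rw [pvMain (pvG o 0) (pvG o 1) _ _ F₁ F₂ q hsub ?_]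
    · by_cases hqe : pvG q 0 ≤ pvG q 1
      · apply pvCut_eq_of
        · have := hsub (pvG q 0) le_rfl hqe; omega
        · have := hsub (pvG q 1) hqe le_rfl; omega
      · rw [pvCut_noop _ _ _ (by intro x h1 h2; omega),
            pvCut_noop _ _ _ (by intro x h1 h2; omega)]
    · intro f hfF x hxo0 hxo1 hxf1 hxf2
      have hb : pvG r 0 ≤ f.1 ∧ f.2 ≤ pvG r 0 + pvG r 2 - 1 := by
        apply pvFr_bounds oldDesired r f
        rw [hF]; simp at hfF ⊢; tauto
      constructor <;> omega
  · rw [pvCutList_noop]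
    · rw [pvCut_noop]
      intro x h1 h2 hcd
      have := hsub x h1 h2; omega
    · intro f hf q' hq' x h1 h2 hcd
      simp only [List.mem_singleton] at hq'; subst hq'
      have hb := pvFr_bounds oldDesired r f hf
      have := hsub x h1 h2; omega

-- all rules: removing A's global overlap list from pieces of o is B's per-range worklist
theorem pvRule (oldDesired : List (List Int)) (o : List Int) (ho : o ∈ oldDesired)
    (rules : List (List Int)) :
    ∀ P : List (List Int), (∀ q ∈ P, pvSub (pvG o 0) (pvG o 1) q) →
      pvCutList P (rules.flatMap (fun r => (pvFound oldDesired r).map (fun f => (pvG f 0, pvG f 1)))) =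
      rules.foldl (fun P r => P.flatMap (pvCut (pvG r 0) (pvG r 0 + pvG r 2 - 1))) P := by
  induction rules with
  | nil => intro P _; rfl
  | cons r rs ih =>
      intro P hP
      rw [List.flatMap_cons, pvCutList_append_F, List.foldl_cons]
      have h1 : pvCutList P ((pvFound oldDesired r).map (fun f => (pvG f 0, pvG f 1))) =
          P.flatMap (pvCut (pvG r 0) (pvG r 0 + pvG r 2 - 1)) := by
        rw [pvCutList_flatMap]
        exact List.flatMap_congr (fun q hq => pvRuleStep oldDesired o ho r q (hP q hq))
      rw [h1]
      apply ih
      intro q' hq'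
      simp only [List.mem_flatMap] at hq'
      obtain ⟨q, hq, hq'⟩ := hq'
      intro x h1 h2
      exact hP q hq x ((pvCut_sub _ _ _ _ hq' x h1 h2).1.1) ((pvCut_sub _ _ _ _ hq' x h1 h2).1.2)

-- A's removeOverlap inner loop body is exactly a pvCut appended to the accumulator
theorem stepA_eq (f : List Int) (acc : List (List Int)) (org : List Int) :
    (let startOverlap := max (pvG org 0) (pvG f 0)
     let endOverlap := min (pvG org 1) (pvG f 1)
     if startOverlap > endOverlap then acc ++ [org]
     else if startOverlap ≤ pvG org 0 ∧ endOverlap ≥ pvG org 1 then acc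
     else if startOverlap > pvG org 0 ∧ endOverlap ≥ pvG org 1 then
       acc ++ [[pvG org 0, startOverlap - 1]]
     else if startOverlap ≤ pvG org 0 ∧ endOverlap < pvG org 1 then
       acc ++ [[endOverlap + 1, pvG org 1]]
     else if startOverlap > pvG org 0 ∧ endOverlap < pvG org 1 then
       acc ++ [[pvG org 0, startOverlap - 1], [endOverlap + 1, pvG org 1]]
     else acc) = acc ++ pvCut (pvG f 0) (pvG f 1) org := by
  simp only [pvCut]
  split_ifs <;> simp <;> omega

theorem removeOverlap_eq (orig toRemove : List (List Int)) :
    removeOverlap orig toRemove = pvCutList orig (toRemove.map (fun f => (pvG f 0, pvG f 1))) := by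
  unfold removeOverlap pvCutList
  rw [List.foldl_map]
  have hstep : (fun (newRange : List (List Int)) (rangeRemove : List Int) =>
      newRange.foldl (fun newTempRange orgRange =>
        let startOverlap := max (pvG orgRange 0) (pvG rangeRemove 0)
        let endOverlap := min (pvG orgRange 1) (pvG rangeRemove 1)
        if startOverlap > endOverlap then newTempRange ++ [orgRange]
        else if startOverlap ≤ pvG orgRange 0 ∧ endOverlap ≥ pvG orgRange 1 then newTempRange
        else if startOverlap > pvG orgRange 0 ∧ endOverlap ≥ pvG orgRange 1 then
          newTempRange ++ [[pvG orgRange 0, startOverlap - 1]]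
        else if startOverlap ≤ pvG orgRange 0 ∧ endOverlap < pvG orgRange 1 then
          newTempRange ++ [[endOverlap + 1, pvG orgRange 1]]
        else if startOverlap > pvG orgRange 0 ∧ endOverlap < pvG orgRange 1 then
          newTempRange ++ [[pvG orgRange 0, startOverlap - 1], [endOverlap + 1, pvG orgRange 1]]
        else newTempRange) []) =
      fun newRange rangeRemove =>
        newRange.flatMap (pvCut (pvG rangeRemove 0) (pvG rangeRemove 1)) := by
    funext newRange rangeRemove
    have h2 : (fun (newTempRange : List (List Int)) (orgRange : List Int) =>
        let startOverlap := max (pvG orgRange 0) (pvG rangeRemove 0)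
        let endOverlap := min (pvG orgRange 1) (pvG rangeRemove 1)
        if startOverlap > endOverlap then newTempRange ++ [orgRange]
        else if startOverlap ≤ pvG orgRange 0 ∧ endOverlap ≥ pvG orgRange 1 then newTempRange
        else if startOverlap > pvG orgRange 0 ∧ endOverlap ≥ pvG orgRange 1 then
          newTempRange ++ [[pvG orgRange 0, startOverlap - 1]]
        else if startOverlap ≤ pvG orgRange 0 ∧ endOverlap < pvG orgRange 1 then
          newTempRange ++ [[endOverlap + 1, pvG orgRange 1]]
        else if startOverlap > pvG orgRange 0 ∧ endOverlap < pvG orgRange 1 then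
          newTempRange ++ [[pvG orgRange 0, startOverlap - 1], [endOverlap + 1, pvG orgRange 1]]
        else newTempRange) =
        fun newTempRange orgRange =>
          newTempRange ++ pvCut (pvG rangeRemove 0) (pvG rangeRemove 1) orgRange := by
      funext acc org
      exact stepA_eq rangeRemove acc org
    rw [h2, PySem.List.foldl_append_eq_flatMap]
    simp
  rw [hstep]

-- A's inner desired-range loop appends this rule's found and mapped lists to the pair state
theorem foldA (oldDesired : List (List Int)) (rule : List Int) :
    ∀ st : List (List Int) × List (List Int),
      oldDesired.foldl (fun (st : List (List Int) × List (List Int)) outValue =>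
        let startOverlap := max (pvG outValue 0) (pvG rule 0)
        let endOverlap := min (pvG outValue 1) (pvG rule 0 + pvG rule 2 - 1)
        if startOverlap ≤ endOverlap then
          (st.1 ++ [[startOverlap, endOverlap]],
           st.2 ++ [[startOverlap - pvG rule 0 + pvG rule 1, endOverlap - pvG rule 0 + pvG rule 1]])
        else st) st =
      (st.1 ++ pvFound oldDesired rule, st.2 ++ pvMapped oldDesired rule) := by
  induction oldDesired with
  | nil => intro st; simp [pvFound, pvMapped]
  | cons o t ih =>
      intro st
      rw [List.foldl_cons]
      by_cases hc : max (pvG o 0) (pvG rule 0) ≤ min (pvG o 1) (pvG rule 0 + pvG rule 2 - 1)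
      · have hF : pvFound (o :: t) rule =
            [max (pvG o 0) (pvG rule 0), min (pvG o 1) (pvG rule 0 + pvG rule 2 - 1)] :: pvFound t rule := by
          unfold pvFound; rw [List.filterMap_cons, if_pos hc]
        have hM : pvMapped (o :: t) rule =
            [max (pvG o 0) (pvG rule 0) - pvG rule 0 + pvG rule 1,
             min (pvG o 1) (pvG rule 0 + pvG rule 2 - 1) - pvG rule 0 + pvG rule 1] :: pvMapped t rule := by
          unfold pvMapped; rw [List.filterMap_cons, if_pos hc]
        simp only [hc, if_true]
        rw [ih, hF, hM]
        simp [List.append_assoc]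
      · have hF : pvFound (o :: t) rule = pvFound t rule := by
          unfold pvFound; rw [List.filterMap_cons, if_neg hc]
        have hM : pvMapped (o :: t) rule = pvMapped t rule := by
          unfold pvMapped; rw [List.filterMap_cons, if_neg hc]
        simp only [hc, if_false]
        rw [ih, hF, hM]

-- A's rule-major double loop builds exactly (all found overlaps, all mapped ranges)
theorem foldAA (oldDesired rules : List (List Int)) :
    ∀ st : List (List Int) × List (List Int),
    rules.foldl (fun (st : List (List Int) × List (List Int)) rule =>
      oldDesired.foldl (fun (st : List (List Int) × List (List Int)) outValue =>
        let startOverlap := max (pvG outValue 0) (pvG rule 0)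
        let endOverlap := min (pvG outValue 1) (pvG rule 0 + pvG rule 2 - 1)
        if startOverlap ≤ endOverlap then
          (st.1 ++ [[startOverlap, endOverlap]],
           st.2 ++ [[startOverlap - pvG rule 0 + pvG rule 1, endOverlap - pvG rule 0 + pvG rule 1]])
        else st) st) st =
    (st.1 ++ rules.flatMap (pvFound oldDesired), st.2 ++ rules.flatMap (pvMapped oldDesired)) := by
  induction rules with
  | nil => intro st; simp
  | cons r rs ih =>
      intro st
      rw [List.foldl_cons, foldA oldDesired r st, ih]
      simp

theorem main_eq (oldDesired rules : List (List Int)) :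
    convertToNewDesiredFromStep oldDesired rules = convertToNewDesiredFromStep_alt oldDesired rules := by
  show PySem.List.sorted _ (fun rng => pvG rng 0) false = _
  rw [foldAA oldDesired rules ([], [])]
  simp only [List.nil_append]
  rw [removeOverlap_eq, List.map_flatMap, pvCutList_flatMap]
  have hrem : oldDesired.flatMap
        (fun o => pvCutList [o]
          (rules.flatMap (fun r => (pvFound oldDesired r).map (fun f => (pvG f 0, pvG f 1))))) =
      oldDesired.flatMap
        (fun o => rules.foldl (fun P r => P.flatMap (pvCut (pvG r 0) (pvG r 0 + pvG r 2 - 1))) [o]) := by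
    apply List.flatMap_congr
    intro o ho
    apply pvRule oldDesired o ho rules
    intro q hq
    simp only [List.mem_singleton] at hq; subst hq
    exact fun x h1 h2 => ⟨h1, h2⟩
  rw [hrem]
  rfl

-- ===== VERDICT (by name: the statement is the Claim_ definition above) =====
theorem convertToNewDesiredFromStep_spec : Claim_equal_convertToNewDesiredFromStep := by
  intro oldDesired rules _ _
  exact main_eq oldDesired rules
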